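-- pv_equiv track=rewrite | github.com/WilliamThyer/wiki-reference-hound | wikipedia_dead_ref_finder/extract_references.py | normalize_url_for_comparison
-- ===== SOURCE A (Python) =====
-- def normalize_url_for_comparison(url: str) -> str:
--     """
--     Normalize a URL for comparison purposes.
--     Treats HTTP and HTTPS versions of the same domain as equivalent.
--     Also treats www and non-www versions of the same domain as equivalent.
--     Handles common domain variations like .com/.co.uk/.org variations.
--
--     Args:
--         url: URL to normalize
--
--     Returns:
--         Normalized URL string
--     """
--     # Remove protocol for comparison
--     if url.startswith('https://'):
--         url = url[8:]  # Remove 'https://'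
--     elif url.startswith('http://'):
--         url = url[7:]   # Remove 'http://'
--
--     # Remove 'www.' prefix for comparison (treats www.domain.com and domain.com as equivalent)
--     if url.startswith('www.'):
--         url = url[4:]  # Remove 'www.'
--
--     # Handle common domain variations
--     # Extract domain part (everything before the first slash)
--     domain_part = url.split('/')[0] if '/' in url else url
--
--     # Common domain variations mapping
--     domain_variations = {
--         '.co.uk': '.com',      # UK sites often have .com equivalents
--         '.co.za': '.com',      # South African sites
--         '.co.au': '.com',      # Australian sites
--         '.co.nz': '.com',      # New Zealand sites
--         '.co.in': '.com',      # Indian sites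
--         '.co.jp': '.com',      # Japanese sites
--         '.co.kr': '.com',      # Korean sites
--         '.co.il': '.com',      # Israeli sites
--         '.com.au': '.com',     # Australian sites
--         '.com.br': '.com',     # Brazilian sites
--         '.com.mx': '.com',     # Mexican sites
--         '.com.sg': '.com',     # Singapore sites
--         '.com.hk': '.com',     # Hong Kong sites
--         '.com.tw': '.com',     # Taiwanese sites
--         '.com.my': '.com',     # Malaysian sites
--         '.com.ph': '.com',     # Philippine sites
--         '.com.vn': '.com',     # Vietnamese sites
--         '.com.th': '.com',     # Thai sites
--         '.com.id': '.com',     # Indonesian sites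
--     }
--
--     # Apply domain variations
--     for old_suffix, new_suffix in domain_variations.items():
--         if domain_part.endswith(old_suffix):
--             domain_part = domain_part[:-len(old_suffix)] + new_suffix
--             # Reconstruct the URL with the modified domain
--             if '/' in url:
--                 url = domain_part + '/' + '/'.join(url.split('/')[1:])
--             else:
--                 url = domain_part
--             break
--
--     return url
-- ===== SOURCE B (Python) =====
-- _CC_SLDS = {
--     'co.uk', 'co.za', 'co.au', 'co.nz', 'co.in', 'co.jp', 'co.kr', 'co.il',
--     'com.au', 'com.br', 'com.mx', 'com.sg', 'com.hk', 'com.tw', 'com.my',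
--     'com.ph', 'com.vn', 'com.th', 'com.id',
-- }
--
--
-- def normalize_url_for_comparison(url: str) -> str:
--     """Normalize a URL for comparison (protocol- and www-insensitive,
--     known two-label country suffixes mapped to .com)."""
--     if url.startswith('https://'):
--         url = url[8:]
--     elif url.startswith('http://'):
--         url = url[7:]
--     if url.startswith('www.'):
--         url = url[4:]
--     domain, slash, path = url.partition('/')
--     stem, _dot, last = domain.rpartition('.')
--     stem2, dot2, second = stem.rpartition('.')
--     if dot2 and second + '.' + last in _CC_SLDS:
--         url = stem2 + '.com' + slash + path
--     return url
-- ===== Notes on version B (the rewrite author's own statement) =====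
-- stated objective: simpler
-- what changed: Replaces A's 19-iteration endswith-and-rebuild suffix loop (plus split/join URL reconstruction) by one partition of the URL and two rpartitions of the domain that extract the last two dot-labels, followed by a single set-membership test against the known two-label country suffixes.
import Mathlib
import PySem

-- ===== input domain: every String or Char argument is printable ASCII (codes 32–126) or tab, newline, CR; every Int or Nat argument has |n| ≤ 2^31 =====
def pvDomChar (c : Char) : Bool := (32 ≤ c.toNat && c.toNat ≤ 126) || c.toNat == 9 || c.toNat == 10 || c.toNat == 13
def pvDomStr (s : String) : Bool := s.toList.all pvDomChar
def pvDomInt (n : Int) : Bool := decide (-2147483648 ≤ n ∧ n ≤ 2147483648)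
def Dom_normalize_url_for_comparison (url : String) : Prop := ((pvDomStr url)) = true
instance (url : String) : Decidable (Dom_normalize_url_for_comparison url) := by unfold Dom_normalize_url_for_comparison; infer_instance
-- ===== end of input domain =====

-- B replaces A's 19-iteration endswith loop by extracting the last two '.'-labels once
-- (two rpartitions) and one set-membership test; equal return value on every input (objective: simpler).

-- ===== PORT A =====
-- A's domain_variations dict, as an association list in insertion order
def pvVariations : List (List Char × List Char) :=
  [(".co.uk".toList, ".com".toList),
   (".co.za".toList, ".com".toList),
   (".co.au".toList, ".com".toList),
   (".co.nz".toList, ".com".toList),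
   (".co.in".toList, ".com".toList),
   (".co.jp".toList, ".com".toList),
   (".co.kr".toList, ".com".toList),
   (".co.il".toList, ".com".toList),
   (".com.au".toList, ".com".toList),
   (".com.br".toList, ".com".toList),
   (".com.mx".toList, ".com".toList),
   (".com.sg".toList, ".com".toList),
   (".com.hk".toList, ".com".toList),
   (".com.tw".toList, ".com".toList),
   (".com.my".toList, ".com".toList),
   (".com.ph".toList, ".com".toList),
   (".com.vn".toList, ".com".toList),
   (".com.th".toList, ".com".toList),
   (".com.id".toList, ".com".toList)]

-- A's 'for old_suffix, new_suffix in domain_variations.items(): ... break' loop;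
-- returns the (possibly rebuilt) url
def pvALoop (u2 domain_part : List Char) : List (List Char × List Char) → List Char
  | [] => u2
  | (old_suffix, new_suffix) :: rest =>
    if PySem.Chars.endswith domain_part old_suffix then
      let d := PySem.Chars.slice domain_part none (some (-(old_suffix.length : Int))) ++ new_suffix
      if PySem.Chars.isIn "/".toList u2 then
        d ++ "/".toList ++ PySem.Chars.join "/".toList (PySem.List.slice (PySem.Chars.splitOn u2 "/".toList) (some 1) none)
      else d
    else pvALoop u2 domain_part rest

def normalize_url_for_comparison (url : String) : String :=
  let u0 := url.toList
  let u1 := if PySem.Chars.startswith u0 "https://".toList then PySem.Chars.slice u0 (some 8) none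
    else if PySem.Chars.startswith u0 "http://".toList then PySem.Chars.slice u0 (some 7) none
    else u0
  let u2 := if PySem.Chars.startswith u1 "www.".toList then PySem.Chars.slice u1 (some 4) none else u1
  -- url.split('/')[0]: the [0] index never raises (split is never empty), so pyGetD is exact here
  let domain_part := if PySem.Chars.isIn "/".toList u2 then PySem.List.pyGetD (PySem.Chars.splitOn u2 "/".toList) 0 [] else u2
  String.ofList (pvALoop u2 domain_part pvVariations)

-- ===== PORT B =====
-- str.partition for a single-character separator (exact: split at the FIRST occurrence,
-- (s, '', '') when absent)
def pvPartition (s : List Char) (c : Char) : List Char × List Char × List Char :=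
  match s.dropWhile (fun ch => ch ≠ c) with
  | [] => (s, [], [])
  | _ :: rest => (s.takeWhile (fun ch => ch ≠ c), [c], rest)

-- str.rpartition for a single-character separator (exact: split at the LAST occurrence,
-- ('', '', s) when absent)
def pvRPartition (s : List Char) (c : Char) : List Char × List Char × List Char :=
  match s.reverse.dropWhile (fun ch => ch ≠ c) with
  | [] => ([], [], s)
  | _ :: rest => (rest.reverse, [c], (s.reverse.takeWhile (fun ch => ch ≠ c)).reverse)

-- B's _CC_SLDS set literal
def pvCCSLDs : PySem.Set (List Char) :=
  PySem.Set.ofList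
  ["co.uk".toList,
   "co.za".toList,
   "co.au".toList,
   "co.nz".toList,
   "co.in".toList,
   "co.jp".toList,
   "co.kr".toList,
   "co.il".toList,
   "com.au".toList,
   "com.br".toList,
   "com.mx".toList,
   "com.sg".toList,
   "com.hk".toList,
   "com.tw".toList,
   "com.my".toList,
   "com.ph".toList,
   "com.vn".toList,
   "com.th".toList,
   "com.id".toList]

def normalize_url_for_comparison_alt (url : String) : String :=
  let u0 := url.toList
  let u1 := if PySem.Chars.startswith u0 "https://".toList then PySem.Chars.slice u0 (some 8) none
    else if PySem.Chars.startswith u0 "http://".toList then PySem.Chars.slice u0 (some 7) none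
    else u0
  let u2 := if PySem.Chars.startswith u1 "www.".toList then PySem.Chars.slice u1 (some 4) none else u1
  let p := pvPartition u2 '/'            -- domain, slash, path
  let r1 := pvRPartition p.1 '.'         -- stem, _dot, last
  let r2 := pvRPartition r1.1 '.'        -- stem2, dot2, second
  if r2.2.1 ≠ [] ∧ PySem.Set.contains pvCCSLDs (r2.2.2 ++ ".".toList ++ r1.2.2) = true then
    String.ofList (r2.1 ++ ".com".toList ++ p.2.1 ++ p.2.2)
  else
    String.ofList u2

-- ===== PRECONDITION & SPEC =====
def Spec_normalize_url_for_comparison (url : String) (out : String) : Prop := out = normalize_url_for_comparison_alt url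
instance (url : String) (out : String) : Decidable (Spec_normalize_url_for_comparison url out) := by unfold Spec_normalize_url_for_comparison; infer_instance

-- ===== CLAIM (what is proved, stated in full; the proofs are below) =====
def Claim_equal_normalize_url_for_comparison : Prop := ∀ (url : String), Dom_normalize_url_for_comparison url → Spec_normalize_url_for_comparison url (normalize_url_for_comparison url)

-- ===== LEMMAS AND PROOFS =====

def pvSplit1 (c : Char) : List Char → List Char → List (List Char)
  | [], cur => [cur.reverse]
  | ch :: rest, cur => if ch = c then cur.reverse :: pvSplit1 c rest [] else pvSplit1 c rest (ch :: cur)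

lemma pvGo_eq (c : Char) (l : List Char) : ∀ (fuel : Nat) (cur : List Char) (acc : List (List Char)),
    l.length ≤ fuel →
    PySem.Chars.splitOn.go [c] fuel l cur acc = acc.reverse ++ pvSplit1 c l cur := by
  induction l with
  | nil =>
    intro fuel cur acc _
    cases fuel <;> simp [PySem.Chars.splitOn.go, pvSplit1]
  | cons ch rest ih =>
    intro fuel cur acc hf
    simp only [List.length_cons] at hf
    cases fuel with
    | zero => omega
    | succ f =>
      by_cases h : ch = c
      · subst h
        have hp : List.isPrefixOf [ch] (ch :: rest) = true := by simp [List.isPrefixOf]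
        rw [PySem.Chars.splitOn.go]
        simp only [hp, if_true, List.length_cons, List.length_nil, List.drop_succ_cons, List.drop_zero]
        rw [ih f [] (cur.reverse :: acc) (by omega)]
        simp [pvSplit1]
      · have hp : List.isPrefixOf [c] (ch :: rest) = false := by
          simp [List.isPrefixOf]
          intro hc; exact absurd hc.symm h
        rw [PySem.Chars.splitOn.go]
        simp only [hp, Bool.false_eq_true, if_false]
        rw [ih f (ch :: cur) acc (by omega)]
        simp [pvSplit1, h]

lemma pvSplitOn_eq (c : Char) (s : List Char) : PySem.Chars.splitOn s [c] = pvSplit1 c s [] := by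
  unfold PySem.Chars.splitOn
  rw [pvGo_eq c s (s.length + 1) [] [] (by omega)]
  simp

lemma pvSplit1_ne_nil (c : Char) (l cur : List Char) : pvSplit1 c l cur ≠ [] := by
  induction l generalizing cur with
  | nil => simp [pvSplit1]
  | cons ch rest ih => by_cases h : ch = c <;> simp [pvSplit1, h, ih]

lemma pvSplit1_append (c : Char) (a b cur : List Char) (ha : c ∉ a) :
    pvSplit1 c (a ++ c :: b) cur = (cur.reverse ++ a) :: pvSplit1 c b [] := by
  induction a generalizing cur with
  | nil => simp [pvSplit1]
  | cons ch rest ih =>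
    have hne : ¬ ch = c := by intro e; exact ha (by simp [e])
    simp only [List.cons_append, pvSplit1, hne, if_false]
    rw [ih (ch :: cur) (fun hm => ha (List.mem_cons_of_mem _ hm))]
    simp

lemma pvSplit1_intercalate (c : Char) (l cur : List Char) :
    List.intercalate [c] (pvSplit1 c l cur) = cur.reverse ++ l := by
  induction l generalizing cur with
  | nil => simp [pvSplit1, List.intercalate]
  | cons ch rest ih =>
    by_cases h : ch = c
    · subst h
      simp only [pvSplit1, if_true]
      obtain ⟨y, ys, hy⟩ := List.exists_cons_of_ne_nil (pvSplit1_ne_nil ch rest [])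
      rw [hy]
      have : List.intercalate [ch] (cur.reverse :: y :: ys) =
          cur.reverse ++ ch :: List.intercalate [ch] (y :: ys) := by
        simp [List.intercalate, List.intersperse]
      rw [this, ← hy, ih]
      simp
    · simp only [pvSplit1, h, if_false]
      rw [ih]
      simp

lemma pvDropWhile_nil (c : Char) (s : List Char) (h : c ∉ s) :
    s.dropWhile (fun ch => ch ≠ c) = [] := by
  rw [List.dropWhile_eq_nil_iff]
  intro x hx
  simp only [ne_eq, decide_eq_true_eq]
  intro e; exact h (e ▸ hx)

lemma pvWhile_split (c : Char) (a b : List Char) (ha : c ∉ a) :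
    (a ++ c :: b).takeWhile (fun ch => ch ≠ c) = a ∧ (a ++ c :: b).dropWhile (fun ch => ch ≠ c) = c :: b := by
  induction a with
  | nil => simp
  | cons ch rest ih =>
    have hne : ¬ ch = c := fun e => ha (by simp [e])
    have := ih (fun hm => ha (List.mem_cons_of_mem _ hm))
    simp only [List.cons_append, List.takeWhile_cons, List.dropWhile_cons]
    simp only [hne, ne_eq, not_false_eq_true, decide_true, if_true,
      List.cons.injEq, true_and]
    exact ⟨by simpa using this.1, by simpa using this.2⟩

lemma pvFirstOcc (c : Char) (s : List Char) (h : c ∈ s) : ∃ a b, s = a ++ c :: b ∧ c ∉ a := by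
  induction s with
  | nil => simp at h
  | cons ch rest ih =>
    by_cases hc : ch = c
    · exact ⟨[], rest, by simp [hc], by simp⟩
    · have hm : c ∈ rest := by
        rcases List.mem_cons.mp h with h1 | h1
        · exact absurd h1.symm hc
        · exact h1
      obtain ⟨a, b, rfl, hna⟩ := ih hm
      refine ⟨ch :: a, b, by simp, ?_⟩
      intro hm2
      rcases List.mem_cons.mp hm2 with h2 | h2
      · exact hc h2.symm
      · exact hna h2

lemma pvLastOcc (c : Char) (s : List Char) (h : c ∈ s) : ∃ a b, s = a ++ c :: b ∧ c ∉ b := by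
  obtain ⟨a, b, hs, hna⟩ := pvFirstOcc c s.reverse (by simpa using h)
  refine ⟨b.reverse, a.reverse, ?_, by simpa using hna⟩
  have : s.reverse.reverse = (a ++ c :: b).reverse := by rw [hs]
  simpa using this

lemma pvFirstUniq (c : Char) (x y x' y' : List Char) (hx : c ∉ x) (hx' : c ∉ x')
    (h : x ++ c :: y = x' ++ c :: y') : x = x' ∧ y = y' := by
  induction x generalizing x' with
  | nil =>
    cases x' with
    | nil => simpa using h
    | cons ch rest =>
      simp only [List.nil_append, List.cons_append, List.cons.injEq] at h
      exact absurd (by simp [h.1]) hx'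
  | cons ch rest ih =>
    cases x' with
    | nil =>
      simp only [List.nil_append, List.cons_append, List.cons.injEq] at h
      exact absurd (by simp [h.1]) hx
    | cons ch' rest' =>
      simp only [List.cons_append, List.cons.injEq] at h
      obtain ⟨h1, h2⟩ := h
      have := ih rest' (fun hm => hx (List.mem_cons_of_mem _ hm)) (fun hm => hx' (List.mem_cons_of_mem _ hm)) h2
      exact ⟨by simp [h1, this.1], this.2⟩

lemma pvLastUniq (c : Char) (x y x' y' : List Char) (hy : c ∉ y) (hy' : c ∉ y')
    (h : x ++ c :: y = x' ++ c :: y') : x = x' ∧ y = y' := by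
  have hr : y.reverse ++ c :: x.reverse = y'.reverse ++ c :: x'.reverse := by
    have := congrArg List.reverse h
    simpa using this
  have := pvFirstUniq c y.reverse x.reverse y'.reverse x'.reverse
    (by simpa using hy) (by simpa using hy') hr
  constructor
  · have := this.2; simpa using congrArg List.reverse this
  · have := this.1; simpa using congrArg List.reverse this

lemma pvPartition_not_mem (c : Char) (s : List Char) (h : c ∉ s) : pvPartition s c = (s, [], []) := by
  unfold pvPartition
  rw [pvDropWhile_nil c s h]

lemma pvPartition_split (c : Char) (a b : List Char) (ha : c ∉ a) :
    pvPartition (a ++ c :: b) c = (a, [c], b) := by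
  unfold pvPartition
  rw [(pvWhile_split c a b ha).2, (pvWhile_split c a b ha).1]

lemma pvRPartition_not_mem (c : Char) (s : List Char) (h : c ∉ s) : pvRPartition s c = ([], [], s) := by
  unfold pvRPartition
  rw [pvDropWhile_nil c s.reverse (by simpa using h)]

lemma pvRPartition_split (c : Char) (a b : List Char) (hb : c ∉ b) :
    pvRPartition (a ++ c :: b) c = (a, [c], b) := by
  unfold pvRPartition
  have hrev : (a ++ c :: b).reverse = b.reverse ++ c :: a.reverse := by simp
  rw [hrev, (pvWhile_split c b.reverse a.reverse (by simpa using hb)).2,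
    (pvWhile_split c b.reverse a.reverse (by simpa using hb)).1]
  simp

lemma pvIsIn_iff (c : Char) (s : List Char) : PySem.Chars.isIn [c] s = true ↔ c ∈ s := by
  rw [PySem.Chars.isIn_iff_infix]
  constructor
  · intro h; exact h.mem (by simp)
  · intro h
    obtain ⟨u, v, rfl⟩ := List.mem_iff_append.mp h
    exact ⟨u, v, by simp⟩

lemma pvEndswith_iff (s2 mid tl p1 p2 : List Char) (hm : '.' ∉ mid) (ht : '.' ∉ tl)
    (hp1 : '.' ∉ p1) (hp2 : '.' ∉ p2) :
    PySem.Chars.endswith ((s2 ++ '.' :: mid) ++ '.' :: tl) ('.' :: (p1 ++ '.' :: p2)) = true ↔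
      (mid = p1 ∧ tl = p2) := by
  rw [PySem.Chars.endswith_iff]
  constructor
  · rintro ⟨p, hp⟩
    have hp' : (p ++ '.' :: p1) ++ '.' :: p2 = (s2 ++ '.' :: mid) ++ '.' :: tl := by
      simpa [List.append_assoc] using hp
    have h1 := pvLastUniq '.' (p ++ '.' :: p1) p2 (s2 ++ '.' :: mid) tl hp2 ht hp'
    have h2 := pvLastUniq '.' p p1 s2 mid hp1 hm h1.1
    exact ⟨h2.2.symm, h1.2.symm⟩
  · rintro ⟨rfl, rfl⟩
    exact ⟨s2, by simp⟩

lemma pvEndswith_false_no_dot (d p1 p2 : List Char) (h : '.' ∉ d) :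
    PySem.Chars.endswith d ('.' :: (p1 ++ '.' :: p2)) = false := by
  rw [Bool.eq_false_iff]
  intro hw
  obtain ⟨p, hp⟩ := (PySem.Chars.endswith_iff _ _).mp hw
  exact h (by rw [← hp]; simp)

lemma pvEndswith_false_one_dot (s1 tl p1 p2 : List Char) (h1 : '.' ∉ s1) (ht : '.' ∉ tl)
    (hp2 : '.' ∉ p2) :
    PySem.Chars.endswith (s1 ++ '.' :: tl) ('.' :: (p1 ++ '.' :: p2)) = false := by
  rw [Bool.eq_false_iff]
  intro hw
  obtain ⟨p, hp⟩ := (PySem.Chars.endswith_iff _ _).mp hw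
  have hp' : (p ++ '.' :: p1) ++ '.' :: p2 = s1 ++ '.' :: tl := by
    simpa [List.append_assoc] using hp
  have := (pvLastUniq '.' (p ++ '.' :: p1) p2 s1 tl hp2 ht hp').1
  exact h1 (by rw [← this]; simp)

def pvLabels : List (List Char × List Char) :=
  [("co".toList, "uk".toList),
   ("co".toList, "za".toList),
   ("co".toList, "au".toList),
   ("co".toList, "nz".toList),
   ("co".toList, "in".toList),
   ("co".toList, "jp".toList),
   ("co".toList, "kr".toList),
   ("co".toList, "il".toList),
   ("com".toList, "au".toList),
   ("com".toList, "br".toList),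
   ("com".toList, "mx".toList),
   ("com".toList, "sg".toList),
   ("com".toList, "hk".toList),
   ("com".toList, "tw".toList),
   ("com".toList, "my".toList),
   ("com".toList, "ph".toList),
   ("com".toList, "vn".toList),
   ("com".toList, "th".toList),
   ("com".toList, "id".toList)]

lemma pvVariations_eq :
    pvVariations = pvLabels.map (fun pq => ('.' :: (pq.1 ++ '.' :: pq.2), ".com".toList)) := by
  decide

lemma pvLabels_dotless : ∀ pq ∈ pvLabels, '.' ∉ pq.1 ∧ '.' ∉ pq.2 := by decide

lemma pvALoop_none (u2 d : List Char) (lst : List (List Char × List Char))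
    (h : ∀ pq ∈ lst, PySem.Chars.endswith d pq.1 = false) :
    pvALoop u2 d lst = u2 := by
  induction lst with
  | nil => rfl
  | cons pq rest ih =>
    obtain ⟨o, n⟩ := pq
    have ho := h (o, n) (by simp)
    simp only [pvALoop, ho, Bool.false_eq_true, if_false]
    exact ih (fun q hq => h q (List.mem_cons_of_mem _ hq))

lemma pvALoop_map (u2 s2 mid tl : List Char) (hm : '.' ∉ mid) (ht : '.' ∉ tl)
    (lst : List (List Char × List Char)) (hl : ∀ pq ∈ lst, '.' ∉ pq.1 ∧ '.' ∉ pq.2) :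
    pvALoop u2 ((s2 ++ '.' :: mid) ++ '.' :: tl)
        (lst.map (fun pq => ('.' :: (pq.1 ++ '.' :: pq.2), ".com".toList)))
      = if (mid, tl) ∈ lst then
          (s2 ++ ".com".toList) ++
            (if PySem.Chars.isIn "/".toList u2 then
              "/".toList ++ PySem.Chars.join "/".toList (PySem.List.slice (PySem.Chars.splitOn u2 "/".toList) (some 1) none)
             else [])
        else u2 := by
  induction lst with
  | nil => simp [pvALoop]
  | cons pq rest ih =>
    obtain ⟨p1, p2⟩ := pq
    have hp := hl (p1, p2) (by simp)
    have hcond := pvEndswith_iff s2 mid tl p1 p2 hm ht hp.1 hp.2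
    by_cases hc : mid = p1 ∧ tl = p2
    · obtain ⟨rfl, rfl⟩ := hc
      have hew : PySem.Chars.endswith ((s2 ++ '.' :: mid) ++ '.' :: tl) ('.' :: (mid ++ '.' :: tl)) = true := by
        exact hcond.mpr ⟨rfl, rfl⟩
      have hslice : PySem.Chars.slice ((s2 ++ '.' :: mid) ++ '.' :: tl) none
          (some (-((('.' :: (mid ++ '.' :: tl)).length : Int)))) = s2 := by
        rw [PySem.Chars.slice_eq_listSlice, PySem.List.slice_to_neg_natCast _ _ (by simp)]
        have hL : ((s2 ++ '.' :: mid) ++ '.' :: tl).length - ('.' :: (mid ++ '.' :: tl)).length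
            = s2.length := by simp
        rw [hL]
        have hassoc : (s2 ++ '.' :: mid) ++ '.' :: tl = s2 ++ ('.' :: mid ++ '.' :: tl) := by simp
        rw [hassoc]
        exact List.take_left' rfl
      simp only [List.map_cons, pvALoop, hew, if_true, hslice, List.mem_cons, Prod.mk.injEq,
        true_and, true_or, if_true]
      by_cases hin : PySem.Chars.isIn ['/'] u2 = true <;> simp [hin]
    · have hew : PySem.Chars.endswith ((s2 ++ '.' :: mid) ++ '.' :: tl) ('.' :: (p1 ++ '.' :: p2)) = false := by
        rw [Bool.eq_false_iff]; intro hw; exact hc (hcond.mp hw)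
      simp only [List.map_cons, pvALoop, hew, Bool.false_eq_true, if_false]
      rw [ih (fun q hq => hl q (List.mem_cons_of_mem _ hq))]
      have hiff : ((mid, tl) ∈ (p1, p2) :: rest) ↔ ((mid, tl) ∈ rest) := by
        simp only [List.mem_cons, Prod.mk.injEq]
        constructor
        · rintro (h | h)
          · exact absurd h hc
          · exact h
        · intro h
          exact Or.inr h
      rw [if_congr hiff rfl rfl]

lemma pvMem_iff (mid tl : List Char) (hm : '.' ∉ mid) (ht : '.' ∉ tl) :
    PySem.Set.contains pvCCSLDs (mid ++ ".".toList ++ tl) = true ↔ (mid, tl) ∈ pvLabels := by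
  rw [PySem.Set.contains_iff]
  unfold pvCCSLDs
  rw [PySem.Set.mem_ofList]
  simp only [List.mem_cons, List.not_mem_nil, or_false]
  constructor
  · intro hdis
    rcases hdis with h|h|h|h|h|h|h|h|h|h|h|h|h|h|h|h|h|h|h
    · have hu := pvFirstUniq '.' mid tl ("co".toList) ("uk".toList) hm (by decide) (by simpa using h)
      obtain ⟨rfl, rfl⟩ := hu
      decide
    · have hu := pvFirstUniq '.' mid tl ("co".toList) ("za".toList) hm (by decide) (by simpa using h)
      obtain ⟨rfl, rfl⟩ := hu
      decide
    · have hu := pvFirstUniq '.' mid tl ("co".toList) ("au".toList) hm (by decide) (by simpa using h)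
      obtain ⟨rfl, rfl⟩ := hu
      decide
    · have hu := pvFirstUniq '.' mid tl ("co".toList) ("nz".toList) hm (by decide) (by simpa using h)
      obtain ⟨rfl, rfl⟩ := hu
      decide
    · have hu := pvFirstUniq '.' mid tl ("co".toList) ("in".toList) hm (by decide) (by simpa using h)
      obtain ⟨rfl, rfl⟩ := hu
      decide
    · have hu := pvFirstUniq '.' mid tl ("co".toList) ("jp".toList) hm (by decide) (by simpa using h)
      obtain ⟨rfl, rfl⟩ := hu
      decide
    · have hu := pvFirstUniq '.' mid tl ("co".toList) ("kr".toList) hm (by decide) (by simpa using h)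
      obtain ⟨rfl, rfl⟩ := hu
      decide
    · have hu := pvFirstUniq '.' mid tl ("co".toList) ("il".toList) hm (by decide) (by simpa using h)
      obtain ⟨rfl, rfl⟩ := hu
      decide
    · have hu := pvFirstUniq '.' mid tl ("com".toList) ("au".toList) hm (by decide) (by simpa using h)
      obtain ⟨rfl, rfl⟩ := hu
      decide
    · have hu := pvFirstUniq '.' mid tl ("com".toList) ("br".toList) hm (by decide) (by simpa using h)
      obtain ⟨rfl, rfl⟩ := hu
      decide
    · have hu := pvFirstUniq '.' mid tl ("com".toList) ("mx".toList) hm (by decide) (by simpa using h)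
      obtain ⟨rfl, rfl⟩ := hu
      decide
    · have hu := pvFirstUniq '.' mid tl ("com".toList) ("sg".toList) hm (by decide) (by simpa using h)
      obtain ⟨rfl, rfl⟩ := hu
      decide
    · have hu := pvFirstUniq '.' mid tl ("com".toList) ("hk".toList) hm (by decide) (by simpa using h)
      obtain ⟨rfl, rfl⟩ := hu
      decide
    · have hu := pvFirstUniq '.' mid tl ("com".toList) ("tw".toList) hm (by decide) (by simpa using h)
      obtain ⟨rfl, rfl⟩ := hu
      decide
    · have hu := pvFirstUniq '.' mid tl ("com".toList) ("my".toList) hm (by decide) (by simpa using h)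
      obtain ⟨rfl, rfl⟩ := hu
      decide
    · have hu := pvFirstUniq '.' mid tl ("com".toList) ("ph".toList) hm (by decide) (by simpa using h)
      obtain ⟨rfl, rfl⟩ := hu
      decide
    · have hu := pvFirstUniq '.' mid tl ("com".toList) ("vn".toList) hm (by decide) (by simpa using h)
      obtain ⟨rfl, rfl⟩ := hu
      decide
    · have hu := pvFirstUniq '.' mid tl ("com".toList) ("th".toList) hm (by decide) (by simpa using h)
      obtain ⟨rfl, rfl⟩ := hu
      decide
    · have hu := pvFirstUniq '.' mid tl ("com".toList) ("id".toList) hm (by decide) (by simpa using h)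
      obtain ⟨rfl, rfl⟩ := hu
      decide
  · intro h
    simp only [pvLabels, List.mem_cons, List.not_mem_nil, or_false, Prod.mk.injEq] at h
    rcases h with ⟨rfl, rfl⟩|⟨rfl, rfl⟩|⟨rfl, rfl⟩|⟨rfl, rfl⟩|⟨rfl, rfl⟩|⟨rfl, rfl⟩|⟨rfl, rfl⟩|⟨rfl, rfl⟩|⟨rfl, rfl⟩|⟨rfl, rfl⟩|⟨rfl, rfl⟩|⟨rfl, rfl⟩|⟨rfl, rfl⟩|⟨rfl, rfl⟩|⟨rfl, rfl⟩|⟨rfl, rfl⟩|⟨rfl, rfl⟩|⟨rfl, rfl⟩|⟨rfl, rfl⟩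
    all_goals decide

lemma pvCore2 (u2 d tailpart : List Char)
    (hpath : (if PySem.Chars.isIn "/".toList u2 then
        "/".toList ++ PySem.Chars.join "/".toList (PySem.List.slice (PySem.Chars.splitOn u2 "/".toList) (some 1) none)
      else []) = tailpart) :
    pvALoop u2 d pvVariations
      = (if (pvRPartition (pvRPartition d '.').1 '.').2.1 ≠ [] ∧
            PySem.Set.contains pvCCSLDs
              ((pvRPartition (pvRPartition d '.').1 '.').2.2 ++ ".".toList ++ (pvRPartition d '.').2.2) = true then
          (pvRPartition (pvRPartition d '.').1 '.').1 ++ ".com".toList ++ tailpart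
        else u2) := by
  by_cases hd : '.' ∈ d
  · obtain ⟨s1, tl, rfl, ht⟩ := pvLastOcc '.' d hd
    rw [pvRPartition_split '.' s1 tl ht]
    by_cases hs1 : '.' ∈ s1
    · obtain ⟨s2, mid, rfl, hmn⟩ := pvLastOcc '.' s1 hs1
      rw [pvRPartition_split '.' s2 mid hmn]
      rw [pvVariations_eq, pvALoop_map u2 s2 mid tl hmn ht pvLabels pvLabels_dotless, hpath]
      have hccpos := pvMem_iff mid tl hmn ht
      by_cases hmem : (mid, tl) ∈ pvLabels
      · rw [if_pos hmem, if_pos (show _ ∧ _ from ⟨by simp, by simpa using hccpos.mpr hmem⟩)]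
      · rw [if_neg hmem, if_neg]
        intro hcc
        exact hmem (hccpos.mp (by simpa using hcc.2))
    · rw [pvRPartition_not_mem '.' s1 hs1]
      rw [if_neg (by simp)]
      rw [pvVariations_eq]
      apply pvALoop_none
      intro pq hpq
      obtain ⟨q, hq, rfl⟩ := List.mem_map.mp hpq
      exact pvEndswith_false_one_dot s1 tl q.1 q.2 hs1 ht (pvLabels_dotless q hq).2
  · rw [pvRPartition_not_mem '.' d hd]
    rw [show (([], [], d) : List Char × List Char × List Char).1 = ([] : List Char) from rfl]
    rw [pvRPartition_not_mem '.' ([]) (by simp)]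
    rw [if_neg (by simp)]
    rw [pvVariations_eq]
    apply pvALoop_none
    intro pq hpq
    obtain ⟨q, hq, rfl⟩ := List.mem_map.mp hpq
    exact pvEndswith_false_no_dot d q.1 q.2 hd

lemma pvCore (u2 : List Char) :
    String.ofList (pvALoop u2
        (if PySem.Chars.isIn "/".toList u2 then PySem.List.pyGetD (PySem.Chars.splitOn u2 "/".toList) 0 [] else u2)
        pvVariations)
      = (if (pvRPartition (pvRPartition (pvPartition u2 '/').1 '.').1 '.').2.1 ≠ [] ∧
            PySem.Set.contains pvCCSLDs
              ((pvRPartition (pvRPartition (pvPartition u2 '/').1 '.').1 '.').2.2 ++ ".".toList ++ (pvRPartition (pvPartition u2 '/').1 '.').2.2) = true then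
          String.ofList ((pvRPartition (pvRPartition (pvPartition u2 '/').1 '.').1 '.').1 ++ ".com".toList ++ (pvPartition u2 '/').2.1 ++ (pvPartition u2 '/').2.2)
        else String.ofList u2) := by
  by_cases hs : '/' ∈ u2
  · obtain ⟨a, b, rfl, hna⟩ := pvFirstOcc '/' u2 hs
    have hin : PySem.Chars.isIn "/".toList (a ++ '/' :: b) = true :=
      (pvIsIn_iff '/' _).mpr (by simp)
    have hsplit : PySem.Chars.splitOn (a ++ '/' :: b) "/".toList = a :: pvSplit1 '/' b [] := by
      rw [show ("/".toList) = ['/'] from rfl, pvSplitOn_eq, pvSplit1_append '/' a b [] hna]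
      simp
    have htail : (if PySem.Chars.isIn "/".toList (a ++ '/' :: b) then
        "/".toList ++ PySem.Chars.join "/".toList (PySem.List.slice (PySem.Chars.splitOn (a ++ '/' :: b) "/".toList) (some 1) none)
      else []) = '/' :: b := by
      rw [if_pos hin, hsplit, PySem.List.slice_from_one]
      show '/' :: PySem.Chars.join ['/'] ((a :: pvSplit1 '/' b []).tail) = '/' :: b
      rw [List.tail_cons]
      unfold PySem.Chars.join
      rw [pvSplit1_intercalate]
      simp
    rw [if_pos hin, hsplit]
    rw [show PySem.List.pyGetD (a :: pvSplit1 '/' b []) 0 [] = a from by simp [pysem]]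
    rw [pvCore2 (a ++ '/' :: b) a ('/' :: b) htail]
    rw [pvPartition_split '/' a b hna]
    rw [apply_ite String.ofList]
    simp
  · have hin : PySem.Chars.isIn "/".toList u2 = false := by
      rw [Bool.eq_false_iff]
      intro hw
      exact hs ((pvIsIn_iff '/' u2).mp hw)
    have htail : (if PySem.Chars.isIn "/".toList u2 then
        "/".toList ++ PySem.Chars.join "/".toList (PySem.List.slice (PySem.Chars.splitOn u2 "/".toList) (some 1) none)
      else []) = ([] : List Char) := by
      rw [hin]; simp
    rw [hin]
    simp only [Bool.false_eq_true, if_false]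
    rw [pvCore2 u2 u2 [] htail]
    rw [pvPartition_not_mem '/' u2 hs]
    rw [apply_ite String.ofList]
    simp

-- ===== VERDICT (by name: the statement is the Claim_ definition above) =====
theorem normalize_url_for_comparison_spec : Claim_equal_normalize_url_for_comparison := by
  intro url _
  unfold Spec_normalize_url_for_comparison normalize_url_for_comparison normalize_url_for_comparison_alt
  exact pvCore _
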